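-- pv_equiv track=rewrite | github.com/JonathanGreen79/onboarder | streamlit_app.py | reflow_paragraphs
-- ===== SOURCE A (Python) =====
-- def reflow_paragraphs(text: str) -> str:
--     """
--     Collapse 'soft' line breaks into paragraphs and return a clean, wrapped string.
--     We keep blank lines as paragraph separators.
--     """
--     if not text:
--         return ""
--     lines = [ln.rstrip() for ln in text.splitlines()]
--     paras, buf = [], []
--     for ln in lines:
--         if not ln.strip():
--             if buf:
--                 paras.append(" ".join(buf))
--                 buf = []
--         else:
--             buf.append(ln.strip())
--     if buf:
--         paras.append(" ".join(buf))
--     return "\n\n".join(paras)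
-- ===== SOURCE B (Python) =====
-- def reflow_paragraphs(text: str) -> str:
--     """Two-pointer run-peeling: find each maximal run of non-blank lines and
--     join it, instead of A's accumulate-and-flush buffer."""
--     lines = text.splitlines()
--     n = len(lines)
--     paras = []
--     i = 0
--     while i < n:
--         if not lines[i].strip():
--             i += 1
--             continue
--         j = i
--         while j < n and lines[j].strip():
--             j += 1
--         paras.append(" ".join(ln.strip() for ln in lines[i:j]))
--         i = j
--     return "\n\n".join(paras)
-- ===== Notes on version B (the rewrite author's own statement) =====
-- stated objective: alternative
-- what changed: Replaces A's accumulate-and-flush paragraph buffer with a two-pointer scan that locates each maximal run of non-blank lines and joins it directly (no buffer, no end-of-loop flush, no rstrip pre-pass).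
import Mathlib
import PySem

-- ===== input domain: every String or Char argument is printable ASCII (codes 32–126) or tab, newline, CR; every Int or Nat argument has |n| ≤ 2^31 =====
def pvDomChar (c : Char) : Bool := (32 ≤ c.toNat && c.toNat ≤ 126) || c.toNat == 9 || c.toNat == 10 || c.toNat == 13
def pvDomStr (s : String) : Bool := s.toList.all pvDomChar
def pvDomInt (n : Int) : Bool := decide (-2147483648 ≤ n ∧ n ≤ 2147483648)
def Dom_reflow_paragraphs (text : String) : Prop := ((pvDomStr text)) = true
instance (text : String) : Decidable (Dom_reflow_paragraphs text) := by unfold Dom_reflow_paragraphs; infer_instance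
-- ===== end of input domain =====

-- B replaces A's accumulate-and-flush paragraph buffer with a two-pointer scan peeling
-- maximal runs of non-blank lines; same cost, different structure.

-- ===== PORT A =====
-- one loop step of A: state (paras, buf)
def reflowAStep (st : List (List Char) × List (List Char)) (ln : List Char) :
    List (List Char) × List (List Char) :=
  if PySem.Chars.strip ln = [] then
    if st.2 ≠ [] then (st.1 ++ [PySem.Chars.join [' '] st.2], []) else st
  else (st.1, st.2 ++ [PySem.Chars.strip ln])

def reflow_paragraphs (text : String) : String :=
  if text = "" then "" else
  let lines := (PySem.Chars.splitlines text.toList).map PySem.Chars.rstrip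
  let st := lines.foldl reflowAStep ([], [])
  let paras := if st.2 ≠ [] then st.1 ++ [PySem.Chars.join [' '] st.2] else st.1
  String.ofList (PySem.Chars.join ['\n', '\n'] paras)

-- ===== PORT B =====
-- 'lines[j].strip()' is truthy
def pvNonblank (ln : List Char) : Bool := !(PySem.Chars.strip ln).isEmpty

-- B's outer while loop: each iteration skips one blank line or peels one maximal
-- non-blank run lines[i:j] (takeWhile/dropWhile = the inner j-scan and i = j)
def pvParasB : List (List Char) → List (List Char)
  | [] => []
  | ln :: rest =>
    if PySem.Chars.strip ln = [] then pvParasB rest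
    else
      PySem.Chars.join [' ']
          (PySem.Chars.strip ln :: (rest.takeWhile pvNonblank).map PySem.Chars.strip)
        :: pvParasB (rest.dropWhile pvNonblank)
termination_by l => l.length
decreasing_by
  · simp
  · simpa using Nat.lt_succ_of_le (List.length_dropWhile_le pvNonblank rest)

def reflow_paragraphs_alt (text : String) : String :=
  String.ofList (PySem.Chars.join ['\n', '\n']
    (pvParasB (PySem.Chars.splitlines text.toList)))

-- ===== PRECONDITION & SPEC =====
def Spec_reflow_paragraphs (text : String) (out : String) : Prop := out = reflow_paragraphs_alt text
instance (text : String) (out : String) : Decidable (Spec_reflow_paragraphs text out) := by unfold Spec_reflow_paragraphs; infer_instance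

-- ===== CLAIM (what is proved, stated in full; the proofs are below) =====
def Claim_equal_reflow_paragraphs : Prop := ∀ (text : String), Dom_reflow_paragraphs text → Spec_reflow_paragraphs text (reflow_paragraphs text)

-- ===== LEMMAS AND PROOFS =====

-- lstrip and rstrip commute
lemma pv_lstrip_rstrip_comm (p : Char → Bool) (l : List Char) :
    List.dropWhile p (List.dropWhile p l.reverse).reverse
      = (List.dropWhile p (List.dropWhile p l).reverse).reverse := by
  induction l with
  | nil => rfl
  | cons c t ih =>
    by_cases h : p c
    · rcases eq_or_ne (List.dropWhile p t.reverse) [] with he | he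
      · have ht : List.dropWhile p t = [] := by
          have := List.dropWhile_eq_nil_iff.mp he
          exact List.dropWhile_eq_nil_iff.mpr (by intro x hx; exact this x (List.mem_reverse.mpr hx))
        simp [List.dropWhile_append, he, h, ht]
      · simp only [List.reverse_cons, List.dropWhile_append]
        simp [h, ih, he]
    · simp only [List.reverse_cons, List.dropWhile_append, List.dropWhile_cons, h]
      rcases eq_or_ne (List.dropWhile p t.reverse) [] with he | he <;>
        simp [List.dropWhile_append, List.isEmpty_iff, he, h]

lemma pv_dropWhile_idem (p : Char → Bool) (l : List Char) :
    List.dropWhile p (List.dropWhile p l) = List.dropWhile p l := by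
  induction l with
  | nil => rfl
  | cons c t ih =>
    by_cases h : p c
    · simp [h, ih]
    · simp [h]

-- stripping an rstripped line strips the original line
lemma pv_strip_rstrip (l : List Char) :
    PySem.Chars.strip (PySem.Chars.rstrip l) = PySem.Chars.strip l := by
  simp only [PySem.Chars.strip, PySem.Chars.rstrip, PySem.Chars.lstrip,
    pv_lstrip_rstrip_comm, List.reverse_reverse, pv_dropWhile_idem]

lemma pv_step_rstrip (st : List (List Char) × List (List Char)) (ln : List Char) :
    reflowAStep st (PySem.Chars.rstrip ln) = reflowAStep st ln := by
  simp [reflowAStep, pv_strip_rstrip]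

-- B's pending-buffer reading of the remaining lines
def pvPend (buf lines : List (List Char)) : List (List Char) :=
  if buf = [] then pvParasB lines
  else
    PySem.Chars.join [' '] (buf ++ (lines.takeWhile pvNonblank).map PySem.Chars.strip)
      :: pvParasB (lines.dropWhile pvNonblank)

lemma pv_fold_pend (lines paras buf : List (List Char)) :
    (let st := lines.foldl reflowAStep (paras, buf)
     if st.2 ≠ [] then st.1 ++ [PySem.Chars.join [' '] st.2] else st.1)
      = paras ++ pvPend buf lines := by
  induction lines generalizing paras buf with
  | nil =>
    rcases eq_or_ne buf [] with hb | hb <;> simp [pvPend, pvParasB, hb]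
  | cons ln rest ih =>
    simp only [List.foldl_cons]
    by_cases hln : PySem.Chars.strip ln = []
    · have hnb : pvNonblank ln = false := by simp [pvNonblank, hln]
      rcases eq_or_ne buf [] with hb | hb
      · rw [show reflowAStep (paras, buf) ln = (paras, buf) by
            simp [reflowAStep, hln, hb]]
        rw [ih]
        simp [pvPend, hb, pvParasB, hln]
      · rw [show reflowAStep (paras, buf) ln
            = (paras ++ [PySem.Chars.join [' '] buf], ([] : List (List Char))) by
            simp [reflowAStep, hln, hb]]
        rw [ih]
        simp [pvPend, hb, pvParasB, hln, hnb, List.takeWhile_cons, List.dropWhile_cons]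
    · have hnb : pvNonblank ln = true := by simp [pvNonblank, hln]
      rw [show reflowAStep (paras, buf) ln
          = (paras, buf ++ [PySem.Chars.strip ln]) by simp [reflowAStep, hln]]
      rw [ih]
      rcases eq_or_ne buf [] with hb | hb
      · simp [pvPend, hb, pvParasB, hln]
      · simp [pvPend, hb, pvParasB, hln, hnb, List.takeWhile_cons, List.dropWhile_cons]

theorem pv_main (text : String) : reflow_paragraphs text = reflow_paragraphs_alt text := by
  by_cases h : text = ""
  · subst h
    have h1 : reflow_paragraphs "" = "" := by simp [reflow_paragraphs]
    have h2 : reflow_paragraphs_alt "" = "" := by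
      simp only [reflow_paragraphs_alt]
      rw [show String.toList "" = [] from rfl,
        show PySem.Chars.splitlines [] = [] from rfl,
        show pvParasB [] = [] by simp [pvParasB]]
      rfl
    rw [h1, h2]
  · simp only [reflow_paragraphs, reflow_paragraphs_alt, if_neg h]
    rw [List.foldl_map]
    have hfun : (fun (st : List (List Char) × List (List Char)) ln =>
        reflowAStep st (PySem.Chars.rstrip ln)) = reflowAStep := by
      funext st ln; exact pv_step_rstrip st ln
    rw [hfun, pv_fold_pend]
    simp [pvPend]

-- ===== VERDICT (by name: the statement is the Claim_ definition above) =====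
theorem reflow_paragraphs_spec : Claim_equal_reflow_paragraphs := by
  intro text _
  show _ = _
  exact pv_main text
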